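-- pv_equiv track=rewrite | github.com/Loadingname91/AlphaLudo | src/rl_agent_ludo/agents/dqnAgent.py | _is_token_under_threat
-- ===== SOURCE A (Python) =====
-- from typing import Dict, Tuple, Optional, List
--
-- HOME_INDEX = 0
--
-- GOAL_INDEX = 57
--
-- GLOBE_INDEXES = [1, 9, 22, 35, 48]
--
-- STAR_INDEXES = [5, 12, 18, 25, 31, 38, 44, 51]
--
-- def _is_token_under_threat(token_pos: int, enemy_pieces: List[List[int]]) -> bool:
--     """Check if token is under threat - synced with LudoEnv."""
--     if token_pos in GLOBE_INDEXES or token_pos in STAR_INDEXES or token_pos == HOME_INDEX or token_pos == GOAL_INDEX or token_pos > 51: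
--         return False
--
--     for enemy in enemy_pieces:
--         for e_pos in enemy:
--             if e_pos == HOME_INDEX or e_pos == GOAL_INDEX:
--                 continue
--             # Simple distance check (approximate) - matches LudoEnv
--             dist = (token_pos - e_pos) % 52
--             # If enemy is 1-6 steps behind us
--             if 1 <= (-dist % 52) <= 6:
--                 return True
--     return False
-- ===== SOURCE B (Python) =====
-- HOME_INDEX = 0
-- GOAL_INDEX = 57
-- GLOBE_INDEXES = [1, 9, 22, 35, 48]
-- STAR_INDEXES = [5, 12, 18, 25, 31, 38, 44, 51]
--
-- def _is_token_under_threat(token_pos, enemy_pieces):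
--     """Index the enemies once, then probe the six squares behind the token."""
--     if token_pos in GLOBE_INDEXES or token_pos in STAR_INDEXES or token_pos == HOME_INDEX or token_pos == GOAL_INDEX or token_pos > 51:
--         return False
--     threats = {e % 52 for row in enemy_pieces for e in row
--                if e != HOME_INDEX and e != GOAL_INDEX}
--     return any((token_pos + d) % 52 in threats for d in range(1, 7))
-- ===== Notes on version B (the rewrite author's own statement) =====
-- stated objective: alternative
-- what changed: Instead of scanning every enemy and computing a modular distance per enemy, B flattens the enemies once into a set of occupied board squares (mod 52, skipping HOME/GOAL) and then probes the six squares a die-roll behind the token for membership.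
import Mathlib
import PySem

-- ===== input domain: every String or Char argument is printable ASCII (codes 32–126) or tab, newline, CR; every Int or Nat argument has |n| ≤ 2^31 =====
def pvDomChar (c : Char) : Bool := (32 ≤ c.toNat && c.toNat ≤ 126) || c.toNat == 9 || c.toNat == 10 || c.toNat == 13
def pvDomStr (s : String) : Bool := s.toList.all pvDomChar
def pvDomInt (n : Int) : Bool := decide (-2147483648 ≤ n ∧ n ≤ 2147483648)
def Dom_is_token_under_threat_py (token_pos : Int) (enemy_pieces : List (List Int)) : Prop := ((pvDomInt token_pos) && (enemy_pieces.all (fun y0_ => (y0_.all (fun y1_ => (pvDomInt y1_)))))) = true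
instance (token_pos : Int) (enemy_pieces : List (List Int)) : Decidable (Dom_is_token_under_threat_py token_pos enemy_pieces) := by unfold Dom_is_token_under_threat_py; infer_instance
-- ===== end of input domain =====

-- B scans the enemies once into a set of board squares (mod 52) and then probes the six
-- squares a die roll behind the token; same value as A's per-enemy distance scan (alternative decomposition).

-- ===== PORT A =====
-- the shared initial safe-square guard of _is_token_under_threat (identical first line in A and B)
def threatGuard (token_pos : Int) : Bool :=
  [1, 9, 22, 35, 48].contains token_pos || [5, 12, 18, 25, 31, 38, 44, 51].contains token_pos ||
    token_pos == 0 || token_pos == 57 || decide (token_pos > 51)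

-- inner 'for e_pos in enemy' loop with its early return
def aInner (token_pos : Int) : List Int → Bool
  | [] => false
  | e :: rest =>
    if e == 0 || e == 57 then aInner token_pos rest
    else
      let dist := PySem.Int.mod (token_pos - e) 52
      if 1 ≤ PySem.Int.mod (-dist) 52 ∧ PySem.Int.mod (-dist) 52 ≤ 6 then true
      else aInner token_pos rest

-- outer 'for enemy in enemy_pieces' loop
def aOuter (token_pos : Int) : List (List Int) → Bool
  | [] => false
  | row :: rest => if aInner token_pos row then true else aOuter token_pos rest

def is_token_under_threat_py (token_pos : Int) (enemy_pieces : List (List Int)) : Bool :=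
  if threatGuard token_pos then false else aOuter token_pos enemy_pieces

-- ===== PORT B =====
def is_token_under_threat_py_alt (token_pos : Int) (enemy_pieces : List (List Int)) : Bool :=
  if threatGuard token_pos then false
  else
    let threats : PySem.Set Int :=
      PySem.Set.ofList
        ((enemy_pieces.flatMap (fun row => row.filter (fun e => !(e == 0) && !(e == 57)))).map
          (fun e => PySem.Int.mod e 52))
    (PySem.List.pyRange 1 7 1).any
      (fun d => PySem.Set.contains threats (PySem.Int.mod (token_pos + d) 52))

-- ===== PRECONDITION & SPEC =====
def Spec_is_token_under_threat_py (token_pos : Int) (enemy_pieces : List (List Int)) (out : Bool) : Prop := out = is_token_under_threat_py_alt token_pos enemy_pieces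
instance (token_pos : Int) (enemy_pieces : List (List Int)) (out : Bool) : Decidable (Spec_is_token_under_threat_py token_pos enemy_pieces out) := by unfold Spec_is_token_under_threat_py; infer_instance

-- ===== CLAIM (what is proved, stated in full; the proofs are below) =====
def Claim_equal_is_token_under_threat_py : Prop := ∀ (token_pos : Int) (enemy_pieces : List (List Int)), Dom_is_token_under_threat_py token_pos enemy_pieces → Spec_is_token_under_threat_py token_pos enemy_pieces (is_token_under_threat_py token_pos enemy_pieces)

-- ===== LEMMAS AND PROOFS =====

-- A's per-enemy test as an existential over the flattened enemy list
lemma aInner_eq_true_iff (tp : Int) (row : List Int) :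
    aInner tp row = true ↔ ∃ e ∈ row, e ≠ 0 ∧ e ≠ 57 ∧
      1 ≤ PySem.Int.mod (-(PySem.Int.mod (tp - e) 52)) 52 ∧
      PySem.Int.mod (-(PySem.Int.mod (tp - e) 52)) 52 ≤ 6 := by
  induction row with
  | nil => simp [aInner]
  | cons e rest ih =>
    simp only [aInner]
    by_cases h0 : e = 0 ∨ e = 57
    · have : (e == 0 || e == 57) = true := by
        rcases h0 with h | h <;> simp [h]
      rw [if_pos this, ih]
      constructor
      · rintro ⟨x, hx, hr⟩; exact ⟨x, List.mem_cons_of_mem _ hx, hr⟩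
      · rintro ⟨x, hx, hne0, hne57, hr⟩
        rcases List.mem_cons.mp hx with rfl | hx
        · rcases h0 with h | h <;> simp [h] at hne0 hne57
        · exact ⟨x, hx, hne0, hne57, hr⟩
    · push Not at h0
      have : (e == 0 || e == 57) = false := by simp [h0.1, h0.2]
      rw [if_neg (by simp [this])]
      split_ifs with hb
      · simp only [true_iff]
        exact ⟨e, List.mem_cons_self, h0.1, h0.2, hb.1, hb.2⟩
      · rw [ih]
        constructor
        · rintro ⟨x, hx, hr⟩; exact ⟨x, List.mem_cons_of_mem _ hx, hr⟩
        · rintro ⟨x, hx, hne0, hne57, hr⟩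
          rcases List.mem_cons.mp hx with rfl | hx
          · exact absurd ⟨hr.1, hr.2⟩ hb
          · exact ⟨x, hx, hne0, hne57, hr⟩

lemma aOuter_eq_true_iff (tp : Int) (eps : List (List Int)) :
    aOuter tp eps = true ↔ ∃ row ∈ eps, aInner tp row = true := by
  induction eps with
  | nil => simp [aOuter]
  | cons row rest ih =>
    simp only [aOuter]
    split_ifs with h
    · simp only [true_iff]; exact ⟨row, List.mem_cons_self, h⟩
    · rw [ih]
      constructor
      · rintro ⟨r, hr, hi⟩; exact ⟨r, List.mem_cons_of_mem _ hr, hi⟩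
      · rintro ⟨r, hr, hi⟩
        rcases List.mem_cons.mp hr with rfl | hr
        · exact absurd hi (by simp [h])
        · exact ⟨r, hr, hi⟩

-- the arithmetic core: A's "enemy 1–6 steps behind" test ↔ B's "enemy square is one of the
-- six probe squares" test, over Int emod (PySem.Int.mod with positive divisor 52)
lemma threat_arith (tp e : Int) :
    (1 ≤ (-((tp - e) % 52)) % 52 ∧ (-((tp - e) % 52)) % 52 ≤ 6) ↔
      ∃ d : Int, 1 ≤ d ∧ d < 7 ∧ (tp + d) % 52 = e % 52 := by
  constructor
  · rintro ⟨h1, h2⟩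
    exact ⟨(-((tp - e) % 52)) % 52, h1, by omega, by omega⟩
  · rintro ⟨d, hd1, hd2, hde⟩
    omega

theorem is_token_under_threat_py_equiv (tp : Int) (eps : List (List Int)) :
    is_token_under_threat_py tp eps = is_token_under_threat_py_alt tp eps := by
  unfold is_token_under_threat_py is_token_under_threat_py_alt
  split_ifs with hg
  · rfl
  · have h52 : (0:Int) < 52 := by norm_num
    rw [Bool.eq_iff_iff, aOuter_eq_true_iff]
    simp only [List.any_eq_true, PySem.List.mem_pyRange_one,
      PySem.Set.contains_eq_listContains, List.contains_eq_mem, decide_eq_true_eq,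
      PySem.Set.mem_ofList, List.mem_map, List.mem_flatMap, List.mem_filter,
      Bool.and_eq_true, Bool.not_eq_eq_eq_not, Bool.not_true, beq_eq_false_iff_ne,
      aInner_eq_true_iff, PySem.Int.mod_eq_emod_of_pos h52]
    constructor
    · rintro ⟨row, hrow, e, he, hne0, hne57, hb1, hb2⟩
      obtain ⟨d, hd1, hd2, hde⟩ := (threat_arith tp e).mp ⟨hb1, hb2⟩
      exact ⟨d, ⟨hd1, hd2⟩, e, ⟨row, hrow, he, hne0, hne57⟩, hde.symm⟩
    · rintro ⟨d, ⟨hd1, hd2⟩, e, ⟨row, hrow, he, hne0, hne57⟩, hde⟩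
      obtain ⟨hb1, hb2⟩ := (threat_arith tp e).mpr ⟨d, hd1, hd2, hde.symm⟩
      exact ⟨row, hrow, e, he, hne0, hne57, hb1, hb2⟩

-- ===== VERDICT (by name: the statement is the Claim_ definition above) =====
theorem is_token_under_threat_py_spec : Claim_equal_is_token_under_threat_py := by
  intro tp eps _
  exact is_token_under_threat_py_equiv tp eps
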